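-- pv_equiv track=rewrite | github.com/Vasulingamallu/codemind-programs-python | decode string(before reversal).py | find_original_string
-- ===== SOURCE A (Python) =====
-- def find_original_string(N, K, S_prime):
--     S_list = list(S_prime)
--     reversed_segments = []
--     for i in range(K, 0, -1):
--         S_list[:i] = reversed(S_list[:i])
--         reversed_segments.append(''.join(S_list))
--         original_string = reversed_segments[-1]
--     return original_string
-- ===== SOURCE B (Python) =====
-- def find_original_string(N, K, S_prime):
--     # Closed form: the net effect of reversing prefixes of lengths K, K-1, ..., 1
--     # is an outside-in interleaving of the (effective) prefix; O(len(S)) total.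
--     s = S_prime
--     L = len(s)
--     k = K
--     if k > L:
--         # each step with i > L reverses the whole string; only parity matters
--         if (k - L) % 2 == 1:
--             s = s[::-1]
--         k = L
--     parts = []
--     i, j = 0, k - 1
--     while i < j:
--         parts.append(s[j] + s[i])
--         i += 1
--         j -= 1
--     mid = s[i] if i == j else ''
--     return mid + ''.join(reversed(parts)) + s[k:]
-- ===== Notes on version B (the rewrite author's own statement) =====
-- stated objective: faster
-- what changed: Instead of materialising K successive prefix reversals (and a joined copy of the whole string per iteration), B computes the net permutation in closed form: an outside-in two-pointer interleave of the effective prefix (with one parity-determined whole-string reversal when K exceeds the length), built in a single pass.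
import Mathlib
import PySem

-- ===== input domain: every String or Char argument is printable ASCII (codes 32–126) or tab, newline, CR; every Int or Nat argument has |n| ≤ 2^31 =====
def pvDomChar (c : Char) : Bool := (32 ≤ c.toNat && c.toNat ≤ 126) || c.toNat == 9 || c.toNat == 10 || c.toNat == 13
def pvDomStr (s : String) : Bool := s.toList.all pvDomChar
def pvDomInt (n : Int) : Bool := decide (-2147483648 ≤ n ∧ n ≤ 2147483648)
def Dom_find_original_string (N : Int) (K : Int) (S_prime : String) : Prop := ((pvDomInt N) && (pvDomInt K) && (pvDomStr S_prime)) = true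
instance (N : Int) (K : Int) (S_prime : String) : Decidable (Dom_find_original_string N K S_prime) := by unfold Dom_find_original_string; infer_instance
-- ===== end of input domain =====

-- B replaces A's K successive prefix reversals (quadratic in K) by the closed-form
-- outside-in interleaving of the effective prefix; objective: faster.


-- ===== PORT A =====
-- S_list[:i] = reversed(S_list[:i])  (slice assignment with an equal-length replacement)
def stepA (l : List Char) (i : Int) : List Char :=
  (PySem.List.slice l none (some i)).reverse ++ PySem.List.slice l (some i) none

def find_original_string (N : Int) (K : Int) (S_prime : String) : String :=
  let st := (PySem.List.pyRange K 0 (-1)).foldl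
    (fun (st : List Char × List String × Option String) i =>
      let l' := stepA st.1 i
      let seg := String.ofList l'
      (l', st.2.1 ++ [seg], some seg))
    (S_prime.toList, ([], none))
  match st.2.2 with
  | some s => s
  | none => ""   -- K ≤ 0: the loop body never ran, Python raises NameError (outside Pre_)

-- ===== PORT B =====
-- the while loop of Source B: i, j walk inward collecting the two-char parts s[j]+s[i]
def bPairsLoop (s : List Char) (i j : Int) (parts : List (List Char)) :
    List (List Char) × Int × Int :=
  if i < j then
    bPairsLoop s (i + 1) (j - 1)
      (parts ++ [[PySem.List.pyGetD s j ' ', PySem.List.pyGetD s i ' ']])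
  else (parts, i, j)
termination_by (j - i).toNat
decreasing_by omega

def find_original_string_alt (N : Int) (K : Int) (S_prime : String) : String :=
  let sl := S_prime.toList
  let L : Int := sl.length
  let sk : List Char × Int :=
    if L < K then
      (if PySem.Int.mod (K - L) 2 = 1 then (PySem.List.slice? sl none none (-1)).getD [] else sl, L)
    else (sl, K)
  let r := bPairsLoop sk.1 0 (sk.2 - 1) []
  let mid := if r.2.1 = r.2.2 then [PySem.List.pyGetD sk.1 r.2.1 ' '] else []
  String.ofList (mid ++ r.1.reverse.flatten ++ PySem.List.slice sk.1 (some sk.2) none)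

-- ===== PRECONDITION & SPEC =====
-- For K ≤ 0 the loop body never runs and A raises NameError ('original_string' unbound);
-- exactly those inputs are excluded.
def Pre_find_original_string (N : Int) (K : Int) (S_prime : String) : Prop := 1 ≤ K
instance (N : Int) (K : Int) (S_prime : String) : Decidable (Pre_find_original_string N K S_prime) := by
  unfold Pre_find_original_string; infer_instance

def pvWitness_find_original_string : Int × Int × String := (3, 2, "abc")

def Spec_find_original_string (N : Int) (K : Int) (S_prime : String) (out : String) : Prop := out = find_original_string_alt N K S_prime
instance (N : Int) (K : Int) (S_prime : String) (out : String) : Decidable (Spec_find_original_string N K S_prime out) := by unfold Spec_find_original_string; infer_instance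

-- ===== CLAIM (what is proved, stated in full; the proofs are below) =====
def Claim_equal_find_original_string : Prop := ∀ (N : Int) (K : Int) (S_prime : String), Dom_find_original_string N K S_prime → Pre_find_original_string N K S_prime → Spec_find_original_string N K S_prime (find_original_string N K S_prime)

-- ===== LEMMAS AND PROOFS =====

-- the net permutation of A's loop, as a recursion on K
def gA : Nat → List Char → List Char
  | 0, l => l
  | k + 1, l => gA k ((l.take (k + 1)).reverse ++ l.drop (k + 1))

-- outside-in interleaving: both programs compute intl of the effective prefix
def intl : List Char → List Char
  | [] => []
  | a :: s => intl s.reverse ++ [a]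
termination_by l => l.length
decreasing_by simp

lemma pyRange_neg_one_cons (a : Int) (h : 0 < a) :
    PySem.List.pyRange a 0 (-1) = a :: PySem.List.pyRange (a - 1) 0 (-1) := by
  simp only [PySem.List.pyRange]
  norm_num [h]
  rw [show a.toNat = (a-1).toNat + 1 by omega, List.range_succ_eq_map]
  simp [List.map_map, Function.comp_def]
  by_cases h1 : 1 < a
  · simp [h1]
    intro k _; ring
  · have : a = 1 := by omega
    subst this; simp

lemma stepA_eq (l : List Char) (k : Nat) :
    stepA l (k : Int) = (l.take k).reverse ++ l.drop k := by
  simp [stepA, PySem.List.slice_to_natCast, PySem.List.slice_from_natCast]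

lemma foldA_eq (k : Nat) : ∀ (l : List Char) (segs : List String) (o : Option String),
    ((PySem.List.pyRange ((k + 1 : Nat) : Int) 0 (-1)).foldl
      (fun (st : List Char × List String × Option String) i =>
        let l' := stepA st.1 i
        let seg := String.ofList l'
        (l', st.2.1 ++ [seg], some seg)) (l, segs, o)).2.2
    = some (String.ofList (gA (k + 1) l)) := by
  induction k with
  | zero =>
    intro l segs o
    rw [show ((0+1:Nat):Int) = 1 by norm_num, pyRange_neg_one_cons 1 (by norm_num)]
    norm_num [PySem.List.pyRange]
    rw [show (1 : Int) = ((1 : Nat) : Int) by norm_num, stepA_eq]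
    simp [gA]
  | succ k ih =>
    intro l segs o
    rw [show ((k + 1 + 1 : Nat) : Int) = ((k + 2 : Nat) : Int) by push_cast; ring]
    rw [pyRange_neg_one_cons _ (by positivity)]
    rw [show ((k + 2 : Nat) : Int) - 1 = ((k + 1 : Nat) : Int) by push_cast; ring]
    simp only [List.foldl_cons]
    rw [stepA_eq]
    rw [ih]
    rfl

lemma intl_pair (a b : Char) (m : List Char) :
    intl (a :: (m ++ [b])) = intl m ++ [b, a] := by
  rw [intl]
  rw [show (m ++ [b]).reverse = b :: m.reverse by simp]
  rw [intl]
  simp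

lemma gA_closed : ∀ (k : Nat) (l : List Char), k ≤ l.length →
    gA k l = intl (l.take k) ++ l.drop k := by
  intro k
  induction k with
  | zero => intro l _; simp [gA, intl]
  | succ k ih =>
    intro l h
    obtain ⟨a, l₂, rfl⟩ : ∃ a l₂, l = a :: l₂ := by
      cases l with
      | nil => simp at h
      | cons a l₂ => exact ⟨a, l₂, rfl⟩
    have hk : k ≤ l₂.length := by simp at h; omega
    set s := l₂.take k with hs
    have hslen : s.length = k := by simp [hs]; omega
    rw [gA]
    have hstep : ((a :: l₂).take (k+1)).reverse ++ (a :: l₂).drop (k+1)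
        = (s.reverse ++ [a]) ++ l₂.drop k := by
      simp [hs]
    rw [hstep, ih _ (by simp [hslen])]
    have htake : ((s.reverse ++ [a]) ++ l₂.drop k).take k = s.reverse := by
      rw [List.append_assoc, List.take_append_of_le_length (by simp [hslen])]
      simp [hslen]
    have hdrop : ((s.reverse ++ [a]) ++ l₂.drop k).drop k = a :: l₂.drop k := by
      rw [List.append_assoc, List.drop_append_of_le_length (by simp [hslen])]
      simp [hslen]
    rw [htake, hdrop]
    rw [show (a :: l₂).take (k+1) = a :: s by simp [hs]]
    rw [intl]
    simp

lemma gA_over (k : Nat) (l : List Char) (h : l.length ≤ k) :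
    gA (k + 1) l = gA k l.reverse := by
  rw [gA]
  rw [List.take_of_length_le (by omega), List.drop_eq_nil_of_le (by omega)]
  simp

lemma gA_peel : ∀ (d : Nat) (l : List Char),
    gA (l.length + d) l = if d % 2 = 0 then gA l.length l else gA l.length l.reverse := by
  intro d
  induction d with
  | zero => intro l; simp
  | succ d ih =>
    intro l
    rw [show l.length + (d + 1) = (l.length + d) + 1 by ring]
    rw [gA_over _ _ (by omega)]
    have := ih l.reverse
    rw [List.length_reverse] at this
    rw [this]
    rcases Nat.even_or_odd d with hd | hd
    · have h1 : d % 2 = 0 := Nat.even_iff.mp hd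
      have h2 : (d + 1) % 2 = 1 := by omega
      simp [h1, h2]
    · have h1 : d % 2 = 1 := Nat.odd_iff.mp hd
      have h2 : (d + 1) % 2 = 0 := by omega
      simp [h1, h2]

lemma bPairs_lt {s : List Char} {i j : Int} (h : i < j) (parts : List (List Char)) :
    bPairsLoop s i j parts = bPairsLoop s (i + 1) (j - 1)
      (parts ++ [[PySem.List.pyGetD s j ' ', PySem.List.pyGetD s i ' ']]) := by
  rw [bPairsLoop, if_pos h]

lemma bPairs_ge {s : List Char} {i j : Int} (h : ¬ i < j) (parts : List (List Char)) :
    bPairsLoop s i j parts = (parts, i, j) := by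
  rw [bPairsLoop, if_neg h]

lemma bPairsLoop_acc (s : List Char) : ∀ (n : Nat) (i j : Int), (j - i).toNat = n →
    ∀ (parts : List (List Char)),
    bPairsLoop s i j parts =
      (parts ++ (bPairsLoop s i j []).1, (bPairsLoop s i j []).2) := by
  intro n
  induction n using Nat.strong_induction_on with
  | _ n ih =>
    intro i j hn parts
    by_cases hij : i < j
    · rw [bPairs_lt hij, bPairs_lt hij]
      rw [ih ((j - 1) - (i + 1)).toNat (by omega) _ _ rfl,
          ih ((j - 1) - (i + 1)).toNat (by omega) _ _ rfl ([] ++ _)]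
      simp
    · rw [bPairs_ge hij, bPairs_ge hij]
      simp

def bOut (s : List Char) (i j : Int) : List Char :=
  (if (bPairsLoop s i j []).2.1 = (bPairsLoop s i j []).2.2
    then [PySem.List.pyGetD s (bPairsLoop s i j []).2.1 ' '] else [])
    ++ (bPairsLoop s i j []).1.reverse.flatten


lemma bOut_step {s : List Char} {i j : Int} (h : i < j) :
    bOut s i j = bOut s (i + 1) (j - 1)
      ++ [PySem.List.pyGetD s j ' ', PySem.List.pyGetD s i ' '] := by
  rw [bOut, bOut, bPairs_lt h,
      bPairsLoop_acc s (j - 1 - (i + 1)).toNat _ _ rfl]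
  simp

lemma seg_decomp (s : List Char) (a b : Nat) (hab : a < b) (hb : b < s.length) :
    (s.drop a).take (b + 1 - a)
      = s[a] :: (((s.drop (a + 1)).take (b - 1 + 1 - (a + 1))) ++ [s[b]]) := by
  have ha : a < s.length := by omega
  rw [List.drop_eq_getElem_cons ha]
  rw [show b + 1 - a = (b - a) + 1 by omega]
  rw [List.take_succ_cons]
  congr 1
  rw [show b - a = (b - a - 1) + 1 by omega, List.take_add_one]
  congr 1
  · congr 1; omega
  · have : (s.drop (a + 1))[b - a - 1]? = some s[b] := by
      rw [List.getElem?_drop]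
      rw [List.getElem?_eq_getElem (by omega)]
      congr 1
      congr 1
      omega
    rw [this]
    rfl

lemma bOut_eq (s : List Char) : ∀ (n : Nat) (a b : Nat), b + 1 - a = n → b < s.length → a ≤ b + 1 →
    bOut s (a : Int) (b : Int) = intl ((s.drop a).take (b + 1 - a)) := by
  intro n
  induction n using Nat.strong_induction_on with
  | _ n ih =>
  intro a b hn hb hab
  rcases Nat.lt_trichotomy a b with hlt | heq | hgt
  · -- a < b : one pair peeled
    have hilt : (a : Int) < (b : Int) := by exact_mod_cast hlt
    have ha : PySem.List.pyGetD s (a : Int) ' ' = s[a] :=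
      PySem.List.pyGetD_eq_getElem s ' ' (by omega) (by exact_mod_cast lt_of_lt_of_le hlt hb.le)
    have hbg : PySem.List.pyGetD s (b : Int) ' ' = s[b] :=
      PySem.List.pyGetD_eq_getElem s ' ' (by omega) (by exact_mod_cast hb)
    rw [bOut_step hilt, ha, hbg]
    rw [show (a : Int) + 1 = ((a + 1 : Nat) : Int) by push_cast; ring,
        show (b : Int) - 1 = ((b - 1 : Nat) : Int) by omega]
    rw [ih (b - 1 + 1 - (a + 1)) (by omega) _ _ rfl (by omega) (by omega)]
    rw [seg_decomp s a b hlt hb, intl_pair]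
  · -- a = b
    subst heq
    rw [bOut, bPairs_ge (by omega)]
    simp only [List.reverse_nil, List.flatten_nil, List.append_nil]
    rw [PySem.List.pyGetD_eq_getElem s ' ' (by omega) (by exact_mod_cast hb)]
    simp only [Int.toNat_natCast]
    rw [show a + 1 - a = 1 by omega]
    rw [List.drop_eq_getElem_cons hb]
    rw [List.take_succ_cons, List.take_zero]
    rw [intl]
    simp [intl]
  · -- a = b + 1 : empty segment
    have : a = b + 1 := by omega
    subst this
    rw [bOut, bPairs_ge (by omega)]
    rw [if_neg (by simp)]
    rw [show b + 1 - (b + 1) = 0 by omega]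
    simp [intl]


lemma A_val' (N : Int) (S : String) (m : Nat) :
    find_original_string N ((m + 1 : Nat) : Int) S = String.ofList (gA (m + 1) S.toList) := by
  simp only [find_original_string]
  rw [foldA_eq m S.toList [] none]

lemma A_val (N K : Int) (S : String) (h : 1 ≤ K) :
    find_original_string N K S = String.ofList (gA K.toNat S.toList) := by
  have hK : K = (((K.toNat - 1) + 1 : Nat) : Int) := by omega
  rw [hK, A_val' N S (K.toNat - 1), show (K.toNat - 1) + 1 = K.toNat by omega]
  rw [Int.toNat_natCast]

lemma B_out_core (s : List Char) (k : Int) (hk1 : 1 ≤ k) (hk2 : k ≤ (s.length : Int)) :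
    (if (bPairsLoop s 0 (k - 1) []).2.1 = (bPairsLoop s 0 (k - 1) []).2.2
      then [PySem.List.pyGetD s (bPairsLoop s 0 (k - 1) []).2.1 ' '] else [])
      ++ (bPairsLoop s 0 (k - 1) []).1.reverse.flatten
    = intl (s.take k.toNat) := by
  have h0 : (0 : Int) = ((0 : Nat) : Int) := rfl
  have hb : k - 1 = ((k.toNat - 1 : Nat) : Int) := by omega
  have := bOut_eq s (k.toNat - 1 + 1 - 0) 0 (k.toNat - 1) rfl (by omega) (by omega)
  rw [bOut] at this
  rw [h0, hb, this]
  rw [show k.toNat - 1 + 1 - 0 = k.toNat by omega]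
  simp

lemma B_val_le (N K : Int) (S : String) (h1 : 1 ≤ K) (h2 : K ≤ (S.toList.length : Int)) :
    find_original_string_alt N K S
      = String.ofList (intl (S.toList.take K.toNat) ++ S.toList.drop K.toNat) := by
  unfold find_original_string_alt
  simp only [if_neg (show ¬ ((S.toList.length : Int) < K) by omega)]
  rw [B_out_core S.toList K h1 h2]
  rw [PySem.List.slice_from _ (by omega)]

lemma B_val_gt (N K : Int) (S : String) (h1 : 1 ≤ K) (h2 : (S.toList.length : Int) < K) :
    find_original_string_alt N K S
      = String.ofList (intl (if PySem.Int.mod (K - S.toList.length) 2 = 1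
          then S.toList.reverse else S.toList)) := by
  unfold find_original_string_alt
  simp only [if_pos h2, PySem.List.slice?_none_none_neg_one, Option.getD_some]
  set s' := if PySem.Int.mod (K - (S.toList.length : Int)) 2 = 1 then S.toList.reverse else S.toList with hs'
  have hlen : s'.length = S.toList.length := by
    rw [hs']; split <;> simp
  by_cases hL : S.toList.length = 0
  · have : s' = [] := by rw [← List.length_eq_zero_iff, hlen, hL]
    rw [this]
    rw [bPairs_ge (by omega)]
    have hSL : S.length = 0 := by rw [← String.length_toList]; exact hL
    simp [intl, PySem.List.slice, hSL]
  · rw [show String.ofList (intl s') = String.ofList (intl (s'.take ((S.toList.length : Int)).toNat)) by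
        rw [show ((S.toList.length : Int)).toNat = s'.length by omega]; simp]
    rw [B_out_core s' (S.toList.length : Int) (by omega) (by omega)]
    rw [PySem.List.slice_from _ (by omega)]
    rw [show ((S.toList.length : Int)).toNat = s'.length by omega]
    simp

theorem main_equal (N K : Int) (S : String) (h : 1 ≤ K) :
    find_original_string N K S = find_original_string_alt N K S := by
  rw [A_val N K S h]
  set l := S.toList with hl
  by_cases hle : K ≤ (l.length : Int)
  · rw [B_val_le N K S h hle]
    rw [gA_closed K.toNat l (by omega)]
  · push_neg at hle
    rw [B_val_gt N K S h hle]
    have hm : K.toNat = l.length + (K.toNat - l.length) := by omega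
    rw [hm, gA_peel (K.toNat - l.length) l]
    have hd : K - (l.length : Int) = ((K.toNat - l.length : Nat) : Int) := by omega
    have h2 : PySem.Int.mod (((K.toNat - l.length : Nat) : Int)) 2
        = (((K.toNat - l.length) % 2 : Nat) : Int) := by
      exact_mod_cast PySem.Int.mod_natCast (K.toNat - l.length) 2
    rw [hd, h2]
    have hc : gA l.length l = intl l := by
      rw [gA_closed l.length l (le_refl _)]
      simp
    have hc' : gA l.length l.reverse = intl l.reverse := by
      rw [show l.length = l.reverse.length by simp]
      rw [gA_closed l.reverse.length l.reverse (le_refl _)]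
      rw [List.take_of_length_le (le_refl _), List.drop_eq_nil_of_le (le_refl _), List.append_nil]
    rcases Nat.mod_two_eq_zero_or_one (K.toNat - l.length) with hp | hp
    · rw [hp]
      simp [hc, ← hl]
    · rw [hp]
      simp [hc', ← hl]

-- ===== VERDICT (by name: the statement is the Claim_ definition above) =====
theorem find_original_string_spec : Claim_equal_find_original_string := by
  intro N K S_prime _ hpre
  unfold Pre_find_original_string at hpre
  unfold Spec_find_original_string
  exact main_equal N K S_prime hpre
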